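-- pv_equiv track=rewrite | github.com/goracle/elliptic-fibration-search | search_common.py | _adjacency_Instar
-- ===== SOURCE A (Python) =====
-- def _adjacency_I0star():
--     return {0:[1], 1:[0,2,3,5], 2:[1], 3:[1,4], 4:[3], 5:[1]}
--
-- def _adjacency_Instar(n):
--     total_nodes = n + 6
--     if total_nodes < 6: return {}
--     if total_nodes == 6: return _adjacency_I0star()
--     adj = {i: [] for i in range(total_nodes)}
--     adj[2].extend([0, 1]); adj[0].append(2); adj[1].append(2)
--     adj[n+3].extend([n+4, n+5]); adj[n+4].append(n+3); adj[n+5].append(n+3)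
--     for i in range(2, n + 3):
--         adj[i].append(i + 1); adj[i + 1].append(i)
--     return adj
-- ===== SOURCE B (Python) =====
-- def _adjacency_I0star():
--     return {0:[1], 1:[0,2,3,5], 2:[1], 3:[1,4], 4:[3], 5:[1]}
--
-- def _adjacency_Instar(n):
--     total_nodes = n + 6
--     if total_nodes < 6:
--         return {}
--     if total_nodes == 6:
--         return _adjacency_I0star()
--     adj = {}
--     for i in range(total_nodes):
--         if i < 2:
--             adj[i] = [2]
--         elif i == 2:
--             adj[i] = [0, 1, 3]
--         elif i < n + 3:
--             adj[i] = [i - 1, i + 1]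
--         elif i == n + 3:
--             adj[i] = [n + 4, n + 5, n + 2]
--         else:
--             adj[i] = [n + 3]
--     return adj
-- ===== Notes on version B (the rewrite author's own statement) =====
-- stated objective: simpler
-- what changed: Instead of initialising all lists empty and appending edge endpoints to both sides (fork extends plus a spine loop mutating two entries per step), B makes a single pass over the nodes and writes each node's complete neighbour list directly in closed form.
import Mathlib
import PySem

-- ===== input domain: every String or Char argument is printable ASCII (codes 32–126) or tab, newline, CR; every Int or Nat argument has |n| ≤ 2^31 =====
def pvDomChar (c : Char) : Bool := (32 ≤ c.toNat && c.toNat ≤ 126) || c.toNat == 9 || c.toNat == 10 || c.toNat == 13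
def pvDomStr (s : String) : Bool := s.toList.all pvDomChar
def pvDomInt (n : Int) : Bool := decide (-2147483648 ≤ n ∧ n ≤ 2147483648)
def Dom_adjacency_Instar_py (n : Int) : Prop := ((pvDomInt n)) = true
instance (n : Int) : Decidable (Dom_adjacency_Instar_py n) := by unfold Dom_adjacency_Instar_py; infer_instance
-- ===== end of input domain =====

-- B builds each node's full neighbour list directly in one closed-form pass instead of
-- appending edge endpoints to both sides via extends and a spine loop (objective: simpler).


-- ===== PORT A =====
-- _adjacency_I0star, a dict literal
def adjacency_I0star_py : List (Int × List Int) :=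
  [(0, [1]), (1, [0, 2, 3, 5]), (2, [1]), (3, [1, 4]), (4, [3]), (5, [1])]

-- Python's in-place list.extend / list.append on adj[k] is ported as Dict.modify
-- (the key is always present, so d[k] = d[k] + [...] is exact here).
def adjacency_Instar_py (n : Int) : List (Int × List Int) :=
  let total_nodes := n + 6
  if total_nodes < 6 then []
  else if total_nodes == 6 then adjacency_I0star_py
  else
    let adj : PySem.Dict Int (List Int) :=
      (PySem.List.pyRange 0 total_nodes 1).foldl (fun d i => d.insert i []) PySem.Dict.empty
    let adj := adj.modify 2 [] (· ++ [0, 1])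
    let adj := adj.modify 0 [] (· ++ [2])
    let adj := adj.modify 1 [] (· ++ [2])
    let adj := adj.modify (n+3) [] (· ++ [n+4, n+5])
    let adj := adj.modify (n+4) [] (· ++ [n+3])
    let adj := adj.modify (n+5) [] (· ++ [n+3])
    let adj := (PySem.List.pyRange 2 (n+3) 1).foldl
      (fun d i => (d.modify i [] (· ++ [i+1])).modify (i+1) [] (· ++ [i])) adj
    adj.items

-- ===== PORT B =====
-- closed-form neighbour list of node i in the I_n* diagram on n+6 nodes
def nbr_Instar (n i : Int) : List Int :=
  if i < 2 then [2]
  else if i = 2 then [0, 1, 3]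
  else if i < n + 3 then [i - 1, i + 1]
  else if i = n + 3 then [n + 4, n + 5, n + 2]
  else [n + 3]

def adjacency_Instar_py_alt (n : Int) : List (Int × List Int) :=
  let total_nodes := n + 6
  if total_nodes < 6 then []
  else if total_nodes == 6 then adjacency_I0star_py
  else
    ((PySem.List.pyRange 0 total_nodes 1).foldl
      (fun d i => d.insert i (nbr_Instar n i)) PySem.Dict.empty).items

-- ===== PRECONDITION & SPEC =====
def Spec_adjacency_Instar_py (n : Int) (out : List (Int × List Int)) : Prop := out = adjacency_Instar_py_alt n
instance (n : Int) (out : List (Int × List Int)) : Decidable (Spec_adjacency_Instar_py n out) := by unfold Spec_adjacency_Instar_py; infer_instance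

-- ===== CLAIM (what is proved, stated in full; the proofs are below) =====
def Claim_equal_adjacency_Instar_py : Prop := ∀ (n : Int), Dom_adjacency_Instar_py n → Spec_adjacency_Instar_py n (adjacency_Instar_py n)

-- ===== LEMMAS AND PROOFS =====

-- A's spine loop, at the level of a single key's value (any list l, by induction)
theorem spine_getD (l : List Int) (k : Int) :
    ∀ (d : PySem.Dict Int (List Int)),
    (l.foldl (fun d i => (d.modify i [] (· ++ [i+1])).modify (i+1) [] (· ++ [i])) d).getD k []
      = d.getD k [] ++ l.flatMap
          (fun i => (if i = k then [i+1] else []) ++ (if i + 1 = k then [i] else [])) := by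
  induction l with
  | nil => intro d; simp
  | cons i t ih =>
    intro d
    rw [List.foldl_cons, ih, List.flatMap_cons]
    simp only [PySem.Dict.getD_modify]
    clear ih
    by_cases h2 : k = i + 1
    · simp [h2, show ¬ ((i:Int) + 1 = i) by omega, show ¬ ((i:Int) = i + 1) by omega]
    · by_cases h1 : k = i
      · simp [h1, show ¬ ((i:Int) = i + 1) by omega, show ¬ ((i:Int) + 1 = i) by omega]
      · simp [h1, h2, show ¬ (i = k) from fun h => h1 h.symm,
              show ¬ (i + 1 = k) from fun h => h2 h.symm,
              show ¬ ((i:Int) + 1 = i) by omega]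

-- the per-key contribution of the spine loop over a range, in closed form
theorem spine_flat (k : Int) : ∀ (m : Nat) (a b : Int), b - a ≤ (m : Int) →
    (PySem.List.pyRange a b 1).flatMap
        (fun i => (if i = k then [i+1] else []) ++ (if i + 1 = k then [i] else []))
      = (if a ≤ k - 1 ∧ k - 1 < b then [k - 1] else []) ++ (if a ≤ k ∧ k < b then [k + 1] else []) := by
  intro m
  induction m with
  | zero =>
    intro a b h
    rw [PySem.List.pyRange_one_eq_nil (by omega), if_neg (by omega), if_neg (by omega)]
    simp
  | succ m ih =>
    intro a b h
    by_cases hab : b ≤ a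
    · rw [PySem.List.pyRange_one_eq_nil hab, if_neg (by omega), if_neg (by omega)]
      simp
    · rw [PySem.List.pyRange_one_cons (by omega), List.flatMap_cons, ih (a+1) b (by omega)]
      clear ih
      split_ifs <;> simp_all <;> try omega

-- a modify at a key that is already present keeps the key list
theorem keys_modify_mem (d : PySem.Dict Int (List Int)) (k : Int) (f : List Int → List Int)
    (h : k ∈ d.keys) : (d.modify k [] f).keys = d.keys := by
  rw [PySem.Dict.keys_modify, PySem.Dict.keys_insert_of_contains]
  rw [PySem.Dict.contains_eq_decide_mem_keys]
  simp [h]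

-- keys are preserved by the spine loop (every touched key is already present)
theorem spine_keys (l : List Int) :
    ∀ (d : PySem.Dict Int (List Int)), (∀ i ∈ l, i ∈ d.keys ∧ i + 1 ∈ d.keys) →
    (l.foldl (fun d i => (d.modify i [] (· ++ [i+1])).modify (i+1) [] (· ++ [i])) d).keys = d.keys := by
  induction l with
  | nil => intro d _; simp
  | cons i t ih =>
    intro d h
    have hi := h i (by simp)
    have hk1 : (d.modify i [] (· ++ [i+1])).keys = d.keys := keys_modify_mem d i _ hi.1
    have hk2 : ((d.modify i [] (· ++ [i+1])).modify (i+1) [] (· ++ [i])).keys = d.keys := by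
      rw [keys_modify_mem _ (i+1) _ (by rw [hk1]; exact hi.2)]
      exact hk1
    rw [List.foldl_cons, ih _ (by intro j hj; rw [hk2]; exact h j (by simp [hj]))]
    exact hk2

-- the fresh-key insert fold used to build both dicts, specialised to a range
theorem init_items (tot : Int) (v : Int → List Int) :
    ((PySem.List.pyRange 0 tot 1).foldl (fun d i => d.insert i (v i)) PySem.Dict.empty).items
      = (PySem.List.pyRange 0 tot 1).map (fun i => (i, v i)) := by
  have := PySem.Dict.items_foldl_insert_fresh (PySem.List.pyRange 0 tot 1)
      (fun i => i) v PySem.Dict.empty (by intro a _; simp)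
      (by simpa using PySem.List.nodup_pyRange_one 0 tot)
  simpa using this

-- value of one key after A's six pre-loop modifies plus the spine contribution = B's closed form
theorem chain_getD (n : Int) (hn : 1 ≤ n) (d : PySem.Dict Int (List Int))
    (hd : ∀ j, d.getD j [] = []) (k : Int) (hk0 : 0 ≤ k) (hk1 : k < n + 6) :
    ((((((d.modify 2 [] (· ++ [0, 1])).modify 0 [] (· ++ [2])).modify 1 [] (· ++ [2])).modify
        (n+3) [] (· ++ [n+4, n+5])).modify (n+4) [] (· ++ [n+3])).modify (n+5) [] (· ++ [n+3])).getD k []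
      ++ ((if 2 ≤ k - 1 ∧ k - 1 < n + 3 then [k - 1] else [])
          ++ (if 2 ≤ k ∧ k < n + 3 then [k + 1] else []))
      = nbr_Instar n k := by
  simp only [PySem.Dict.getD_modify]
  unfold nbr_Instar
  by_cases e0 : k = 0
  · subst e0
    simp [hd, show ¬((0:Int) = n+5) by omega, show ¬((0:Int) = n+4) by omega,
          show ¬((0:Int) = n+3) by omega,
          show ¬(2 ≤ (0:Int)-1 ∧ (0:Int)-1 < n+3) by omega,
          show ¬(2 ≤ (0:Int) ∧ (0:Int) < n+3) by omega]
  · by_cases e1 : k = 1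
    · subst e1
      simp [hd, show ¬((1:Int) = n+5) by omega, show ¬((1:Int) = n+4) by omega,
            show ¬((1:Int) = n+3) by omega,
            show ¬(2 ≤ (1:Int)-1 ∧ (1:Int)-1 < n+3) by omega,
            show ¬(2 ≤ (1:Int) ∧ (1:Int) < n+3) by omega]
    · by_cases e2 : k = 2
      · subst e2
        simp [hd, show ¬((2:Int) = n+5) by omega, show ¬((2:Int) = n+4) by omega,
              show ¬((2:Int) = n+3) by omega,
              show ¬(2 ≤ (2:Int)-1 ∧ (2:Int)-1 < n+3) by omega,
              show (2 ≤ (2:Int) ∧ (2:Int) < n+3) by omega]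
      · by_cases e3 : k = n + 3
        · subst e3
          simp [hd, show ¬((n:Int)+3 = n+5) by omega, show ¬((n:Int)+3 = n+4) by omega,
                show ¬((n:Int)+3 = 1) by omega, show ¬((n:Int)+3 = 0) by omega,
                show ¬((n:Int)+3 = 2) by omega, show ¬((n:Int)+3 < 2) by omega,
                show ¬((n:Int)+3 < n+3) by omega,
                show (2 ≤ (n:Int)+3-1 ∧ (n:Int)+3-1 < n+3) by omega,
                show ¬(2 ≤ (n:Int)+3 ∧ (n:Int)+3 < n+3) by omega,
                show (n:Int)+3-1 = n+2 by omega]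
          try omega
        · by_cases e4 : k = n + 4
          · subst e4
            simp [hd, show ¬((n:Int)+4 = n+5) by omega, show ¬((n:Int)+4 = n+3) by omega,
                  show ¬((n:Int)+4 = 1) by omega, show ¬((n:Int)+4 = 0) by omega,
                  show ¬((n:Int)+4 = 2) by omega, show ¬((n:Int)+4 < 2) by omega,
                  show ¬((n:Int)+4 < n+3) by omega,
                  show ¬(2 ≤ (n:Int)+4-1 ∧ (n:Int)+4-1 < n+3) by omega,
                  show ¬(2 ≤ (n:Int)+4 ∧ (n:Int)+4 < n+3) by omega]
          · by_cases e5 : k = n + 5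
            · subst e5
              simp [hd, show ¬((n:Int)+5 = n+4) by omega, show ¬((n:Int)+5 = n+3) by omega,
                    show ¬((n:Int)+5 = 1) by omega, show ¬((n:Int)+5 = 0) by omega,
                    show ¬((n:Int)+5 = 2) by omega, show ¬((n:Int)+5 < 2) by omega,
                    show ¬((n:Int)+5 < n+3) by omega,
                    show ¬(2 ≤ (n:Int)+5-1 ∧ (n:Int)+5-1 < n+3) by omega,
                    show ¬(2 ≤ (n:Int)+5 ∧ (n:Int)+5 < n+3) by omega]
            · -- interior spine node: 3 ≤ k ≤ n + 2
              simp [hd, e0, e1, e2, e3, e4, e5, show ¬(k < 2) by omega,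
                    show k < n + 3 by omega,
                    show (2 ≤ k-1 ∧ k-1 < n+3) by omega,
                    show (2 ≤ k ∧ k < n+3) by omega]

-- A's full dict has exactly B's items, for n ≥ 1
theorem A_core (n : Int) (hn : 1 ≤ n) :
    ((PySem.List.pyRange 2 (n+3) 1).foldl
        (fun d i => (d.modify i [] (· ++ [i+1])).modify (i+1) [] (· ++ [i]))
        ((((((((PySem.List.pyRange 0 (n+6) 1).foldl (fun d i => d.insert i []) PySem.Dict.empty).modify
            2 [] (· ++ [0, 1])).modify 0 [] (· ++ [2])).modify 1 [] (· ++ [2])).modify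
            (n+3) [] (· ++ [n+4, n+5])).modify (n+4) [] (· ++ [n+3])).modify (n+5) [] (· ++ [n+3]))).items
      = (PySem.List.pyRange 0 (n+6) 1).map (fun i => (i, nbr_Instar n i)) := by
  have hItems := init_items (n+6) (fun _ => ([] : List Int))
  obtain ⟨d, hdq⟩ : ∃ d : PySem.Dict Int (List Int),
      ((PySem.List.pyRange 0 (n+6) 1).foldl
        (fun (d : PySem.Dict Int (List Int)) (i : Int) => d.insert i []) PySem.Dict.empty) = d :=
    ⟨_, rfl⟩
  rw [hdq] at hItems ⊢
  have hK : d.keys = PySem.List.pyRange 0 (n+6) 1 := by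
    simp only [PySem.Dict.keys, hItems, List.map_map]
    simp [Function.comp_def]
  have hnd : d.keys.Nodup := by rw [hK]; exact PySem.List.nodup_pyRange_one 0 (n+6)
  have hgetD : ∀ j, d.getD j [] = [] := by
    intro j
    by_cases hj : j ∈ d.keys
    · rw [hK, PySem.List.mem_pyRange_one] at hj
      have hmem : (j, ([] : List Int)) ∈ d.items := by
        rw [hItems]
        exact List.mem_map.mpr ⟨j, by rw [PySem.List.mem_pyRange_one]; exact hj, rfl⟩
      exact PySem.Dict.getD_of_mem_items d hmem hnd []
    · exact PySem.Dict.getD_of_not_contains d []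
        (by rw [PySem.Dict.contains_eq_decide_mem_keys]; simpa using hj)
  -- keys survive the six modifies and the spine loop
  have memL : ∀ j : Int, 0 ≤ j → j < n + 6 → j ∈ d.keys := by
    intro j h1 h2; rw [hK, PySem.List.mem_pyRange_one]; omega
  have step : ∀ (e : PySem.Dict Int (List Int)) (k : Int) (f : List Int → List Int),
      e.keys = d.keys → 0 ≤ k → k < n + 6 → (e.modify k [] f).keys = d.keys := by
    intro e k f he h1 h2
    rw [keys_modify_mem e k f (by rw [he]; exact memL k h1 h2), he]
  have hPreK :
      ((((((d.modify 2 [] (· ++ [0, 1])).modify 0 [] (· ++ [2])).modify 1 [] (· ++ [2])).modify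
        (n+3) [] (· ++ [n+4, n+5])).modify (n+4) [] (· ++ [n+3])).modify (n+5) [] (· ++ [n+3])).keys
        = d.keys :=
    step _ _ _ (step _ _ _ (step _ _ _ (step _ _ _ (step _ _ _ (step _ _ _ rfl (by omega) (by omega))
      (by omega) (by omega)) (by omega) (by omega)) (by omega) (by omega)) (by omega) (by omega))
      (by omega) (by omega)
  have hFinK :
      ((PySem.List.pyRange 2 (n+3) 1).foldl
        (fun d i => (d.modify i [] (· ++ [i+1])).modify (i+1) [] (· ++ [i]))
        ((((((d.modify 2 [] (· ++ [0, 1])).modify 0 [] (· ++ [2])).modify 1 [] (· ++ [2])).modify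
          (n+3) [] (· ++ [n+4, n+5])).modify (n+4) [] (· ++ [n+3])).modify (n+5) [] (· ++ [n+3]))).keys
        = d.keys := by
    rw [spine_keys _ _ ?_, hPreK]
    intro i hi
    rw [PySem.List.mem_pyRange_one] at hi
    rw [hPreK]
    exact ⟨memL i (by omega) (by omega), memL (i+1) (by omega) (by omega)⟩
  rw [PySem.Dict.items_eq_map_keys _ (by rw [hFinK]; exact hnd) [], hFinK, hK]
  apply List.map_congr_left
  intro k hk
  rw [PySem.List.mem_pyRange_one] at hk
  have hval := chain_getD n hn d hgetD k hk.1 hk.2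
  rw [spine_getD, spine_flat k (n+1).toNat 2 (n+3) (by omega), hval]

theorem adjacency_Instar_py_eq_alt (n : Int) :
    adjacency_Instar_py n = adjacency_Instar_py_alt n := by
  unfold adjacency_Instar_py adjacency_Instar_py_alt
  by_cases h6 : n + 6 < 6
  · simp [h6]
  · by_cases h0 : n + 6 = 6
    · simp [h0]
    · have hn : 1 ≤ n := by omega
      have hne : ¬ ((n + 6 : Int) == 6) = true := by simpa using h0
      simp only [h6, if_false, hne, Bool.false_eq_true]
      rw [init_items (n+6) (nbr_Instar n)]
      exact A_core n hn

-- ===== VERDICT (by name: the statement is the Claim_ definition above) =====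
theorem adjacency_Instar_py_spec : Claim_equal_adjacency_Instar_py := by
  intro n _
  unfold Spec_adjacency_Instar_py
  exact adjacency_Instar_py_eq_alt n
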